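-- pv_equiv track=rewrite | github.com/AndreyFesko/ChallengeFlag | Syberry/flag.py | draw_o_marker
-- ===== SOURCE A (Python) =====
-- def draw_o_marker(v, h, size, matrix):
--     """Drawing 'o' markers."""
--     for t in range(1, int(size/2)):
--         length = int(size/2)-t
--         count = 0
--         offset_y, offset_x = 0, int(size/2)-1-t
--         while count < length:
--             matrix[v-offset_y][h-offset_x] = 'o'
--             offset_y += 1
--             offset_x -= 1
--             count += 1
--     return matrix
-- ===== SOURCE B (Python) =====
-- def draw_o_marker(v, h, size, matrix):
--     """Drawing 'o' markers: fill the same triangle row by row instead of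
--     sweeping anti-diagonals (mutates matrix in place, like the original)."""
--     n = int(size / 2)
--     for offset_y in range(n - 1):
--         for offset_x in range(n - 1 - offset_y):
--             matrix[v - offset_y][h - offset_x] = 'o'
--     return matrix
-- ===== Notes on version B (the rewrite author's own statement) =====
-- stated objective: simpler
-- what changed: Replaces the anti-diagonal sweep (outer loop over diagonals t, inner while-loop walking each diagonal with coupled offset_y/offset_x counters) by a direct row-by-row fill of the same triangle with two plain independent range loops.
import Mathlib
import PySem

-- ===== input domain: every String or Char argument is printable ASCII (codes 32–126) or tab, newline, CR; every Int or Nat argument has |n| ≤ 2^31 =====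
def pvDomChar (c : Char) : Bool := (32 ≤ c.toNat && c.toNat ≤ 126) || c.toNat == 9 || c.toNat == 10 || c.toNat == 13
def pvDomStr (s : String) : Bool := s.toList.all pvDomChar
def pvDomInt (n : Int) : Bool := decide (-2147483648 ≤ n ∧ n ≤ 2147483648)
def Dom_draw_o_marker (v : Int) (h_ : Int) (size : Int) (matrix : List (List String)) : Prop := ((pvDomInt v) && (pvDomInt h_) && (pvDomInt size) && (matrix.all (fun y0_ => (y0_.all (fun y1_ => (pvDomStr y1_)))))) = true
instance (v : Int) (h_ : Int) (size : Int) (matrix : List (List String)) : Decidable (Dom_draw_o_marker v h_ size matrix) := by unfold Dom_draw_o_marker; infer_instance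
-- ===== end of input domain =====

-- B replaces A's coupled anti-diagonal sweep by a plain row-by-row fill of the
-- same triangle of cells (simpler); both mutate the matrix argument in place in
-- Python, and the theorems below are about the returned value.

-- ===== PORT A =====
-- matrix[v-oy][h-ox] = 'o'  (one Python statement, shared by both ports)
def pvSetCell (m : List (List String)) (i j : Int) : List (List String) :=
  PySem.List.pySetD m i (PySem.List.pySetD (PySem.List.pyGetD m i []) j "o")

-- the 'while count < length' loop of A, fuel = number of remaining iterations
def pvAInner (v : Int) (h_ : Int) : Nat → Int → Int → List (List String) → List (List String)
  | 0, _, _, m => m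
  | Nat.succ k, oy, ox, m => pvAInner v h_ k (oy + 1) (ox - 1) (pvSetCell m (v - oy) (h_ - ox))

def draw_o_marker (v : Int) (h_ : Int) (size : Int) (matrix : List (List String)) : List (List String) :=
  let n := size.tdiv 2      -- int(size/2): truncation toward zero
  (PySem.List.pyRange 1 n 1).foldl
    (fun m t => pvAInner v h_ (n - t).toNat 0 (n - 1 - t) m) matrix

-- ===== PORT B =====
def draw_o_marker_alt (v : Int) (h_ : Int) (size : Int) (matrix : List (List String)) : List (List String) :=
  let n := size.tdiv 2
  (PySem.List.pyRange 0 (n - 1) 1).foldl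
    (fun m oy =>
      (PySem.List.pyRange 0 (n - 1 - oy) 1).foldl
        (fun m2 ox => pvSetCell m2 (v - oy) (h_ - ox)) m) matrix

-- ===== PRECONDITION & SPEC =====
-- Pre_: every cell A touches is a valid (possibly negative) Python index;
-- outside it A raises IndexError.
-- (stated via interval endpoints and an enumeration bounded by the matrix size,
-- so that it is cheaply decidable even for a huge `size`)
def Pre_draw_o_marker (v : Int) (h_ : Int) (size : Int) (matrix : List (List String)) : Prop :=
  size.tdiv 2 ≤ 1 ∨
    ((-(matrix.length : Int) ≤ v - (size.tdiv 2 - 2) ∧ v < (matrix.length : Int)) ∧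
      ∀ k ∈ List.range (2 * matrix.length),
        0 ≤ v - ((k : Int) - (matrix.length : Int)) →
        v - ((k : Int) - (matrix.length : Int)) ≤ size.tdiv 2 - 2 →
          (-(((PySem.List.pyGetD matrix ((k : Int) - (matrix.length : Int)) []).length : Int))
              ≤ h_ - (size.tdiv 2 - 2 - (v - ((k : Int) - (matrix.length : Int)))) ∧
            h_ < ((PySem.List.pyGetD matrix ((k : Int) - (matrix.length : Int)) []).length : Int)))
instance (v : Int) (h_ : Int) (size : Int) (matrix : List (List String)) : Decidable (Pre_draw_o_marker v h_ size matrix) := by unfold Pre_draw_o_marker; infer_instance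

def pvWitness_draw_o_marker : Int × Int × Int × List (List String) :=
  (1, 1, 4, [[".", "."], [".", "."]])

def Spec_draw_o_marker (v : Int) (h_ : Int) (size : Int) (matrix : List (List String)) (out : List (List String)) : Prop := out = draw_o_marker_alt v h_ size matrix
instance (v : Int) (h_ : Int) (size : Int) (matrix : List (List String)) (out : List (List String)) : Decidable (Spec_draw_o_marker v h_ size matrix out) := by unfold Spec_draw_o_marker; infer_instance

-- ===== CLAIM (what is proved, stated in full; the proofs are below) =====
def Claim_equal_draw_o_marker : Prop := ∀ (v : Int) (h_ : Int) (size : Int) (matrix : List (List String)), Dom_draw_o_marker v h_ size matrix → Pre_draw_o_marker v h_ size matrix → Spec_draw_o_marker v h_ size matrix (draw_o_marker v h_ size matrix)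

-- ===== LEMMAS AND PROOFS =====

theorem pvIdx_lt {n : Nat} {i : Int} {k : Nat} (h : PySem.List.pyIdx? n i = some k) : k < n := by
  unfold PySem.List.pyIdx? at h
  split_ifs at h <;> simp_all <;> omega

theorem pvSetCell_none {m : List (List String)} {i : Int} (j : Int)
    (h : PySem.List.pyIdx? m.length i = none) : pvSetCell m i j = m := by
  simp [pvSetCell, PySem.List.pySetD, PySem.List.pySet?, h]

theorem pvSetCell_some {m : List (List String)} {i : Int} {k : Nat} (j : Int)
    (h : PySem.List.pyIdx? m.length i = some k) :
    pvSetCell m i j = m.set k (PySem.List.pySetD (m[k]?.getD []) j "o") := by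
  simp [pvSetCell, PySem.List.pySetD, PySem.List.pySet?, PySem.List.pyGetD,
        PySem.List.pyGet?, h]

-- writing 'o' twice into one row: order irrelevant
theorem pvRow_comm (r : List String) (j j' : Int) :
    PySem.List.pySetD (PySem.List.pySetD r j "o") j' "o"
      = PySem.List.pySetD (PySem.List.pySetD r j' "o") j "o" := by
  unfold PySem.List.pySetD PySem.List.pySet?
  rcases hp : PySem.List.pyIdx? r.length j with _ | p <;>
    rcases hp' : PySem.List.pyIdx? r.length j' with _ | p' <;>
      simp [hp, hp', List.length_set]
  by_cases hpp : p = p'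
  · subst hpp; simp [List.set_set]
  · exact List.set_comm _ _ hpp

-- writing 'o' into two cells: order irrelevant
theorem pvSetCell_comm (m : List (List String)) (i j i' j' : Int) :
    pvSetCell (pvSetCell m i j) i' j' = pvSetCell (pvSetCell m i' j') i j := by
  rcases hi : PySem.List.pyIdx? m.length i with _ | k <;>
    rcases hi' : PySem.List.pyIdx? m.length i' with _ | k'
  · simp [pvSetCell_none j hi, pvSetCell_none j' hi']
  · simp only [pvSetCell_none j hi, pvSetCell_some j' hi']
    have h2 : PySem.List.pyIdx?
        (m.set k' (PySem.List.pySetD (m[k']?.getD []) j' "o")).length i = none := by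
      rw [List.length_set]; exact hi
    rw [pvSetCell_none j h2]
  · simp only [pvSetCell_none j' hi', pvSetCell_some j hi]
    have h2 : PySem.List.pyIdx?
        (m.set k (PySem.List.pySetD (m[k]?.getD []) j "o")).length i' = none := by
      rw [List.length_set]; exact hi'
    rw [pvSetCell_none j' h2]
  · have hk := pvIdx_lt hi
    have hk' := pvIdx_lt hi'
    rw [pvSetCell_some j hi, pvSetCell_some j' hi']
    have h2 : PySem.List.pyIdx?
        (m.set k (PySem.List.pySetD (m[k]?.getD []) j "o")).length i' = some k' := by
      rw [List.length_set]; exact hi'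
    have h2' : PySem.List.pyIdx?
        (m.set k' (PySem.List.pySetD (m[k']?.getD []) j' "o")).length i = some k := by
      rw [List.length_set]; exact hi
    rw [pvSetCell_some j' h2, pvSetCell_some j h2']
    by_cases hkk : k = k'
    · subst hkk
      rw [List.getElem?_set_self hk, Option.getD_some, List.set_set,
          List.getElem?_set_self hk, Option.getD_some, List.set_set]
      exact congrArg (m.set k) (pvRow_comm _ j j')
    · rw [List.getElem?_set_ne hkk, List.getElem?_set_ne (Ne.symm hkk)]
      exact List.set_comm _ _ hkk

-- fold writing a list of (offset_y, offset_x) cells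
def pvWriteAll (v : Int) (h_ : Int) (ps : List (Int × Int)) (m : List (List String)) : List (List String) :=
  ps.foldl (fun m2 p => pvSetCell m2 (v - p.1) (h_ - p.2)) m

theorem pvAInner_eq (v h_ : Int) (k : Nat) :
    ∀ (oy ox : Int) (m : List (List String)),
      pvAInner v h_ k oy ox m
        = pvWriteAll v h_ ((List.range k).map fun (c : Nat) => (oy + (c : Int), ox - (c : Int))) m := by
  induction k with
  | zero => intro oy ox m; simp [pvAInner, pvWriteAll]
  | succ k ih =>
    intro oy ox m
    rw [List.range_succ_eq_map]
    simp only [List.map_cons, List.map_map]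
    show pvAInner v h_ k (oy + 1) (ox - 1) (pvSetCell m (v - oy) (h_ - ox)) = _
    rw [ih]
    simp only [pvWriteAll, List.foldl_cons, Nat.cast_zero, add_zero, sub_zero]
    congr 1
    apply List.map_congr_left
    intro c _
    simp only [Function.comp_apply, Nat.cast_succ, Prod.mk.injEq]
    constructor <;> ring

def pvListA (size : Int) : List (Int × Int) :=
  (PySem.List.pyRange 1 (size.tdiv 2) 1).flatMap
    (fun t => (List.range (size.tdiv 2 - t).toNat).map
      fun (c : Nat) => ((c : Int), size.tdiv 2 - 1 - t - (c : Int)))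

def pvListB (size : Int) : List (Int × Int) :=
  (PySem.List.pyRange 0 (size.tdiv 2 - 1) 1).flatMap
    (fun oy => (PySem.List.pyRange 0 (size.tdiv 2 - 1 - oy) 1).map fun ox => (oy, ox))

theorem pvA_eq (v h_ size : Int) (m : List (List String)) :
    draw_o_marker v h_ size m = pvWriteAll v h_ (pvListA size) m := by
  unfold draw_o_marker pvListA pvWriteAll
  rw [List.foldl_flatMap]
  apply List.foldl_ext
  intro m2 t _
  rw [pvAInner_eq]
  simp [pvWriteAll]

theorem pvB_eq (v h_ size : Int) (m : List (List String)) :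
    draw_o_marker_alt v h_ size m = pvWriteAll v h_ (pvListB size) m := by
  unfold draw_o_marker_alt pvListB pvWriteAll
  rw [List.foldl_flatMap]
  apply List.foldl_ext
  intro m2 oy _
  rw [List.foldl_map]

theorem pv_mem_listA (size : Int) (p : Int × Int) :
    p ∈ pvListA size ↔ 0 ≤ p.1 ∧ 0 ≤ p.2 ∧ p.1 + p.2 ≤ size.tdiv 2 - 2 := by
  obtain ⟨a, b⟩ := p
  simp only [pvListA, List.mem_flatMap, PySem.List.mem_pyRange_one, List.mem_map,
    List.mem_range, Prod.mk.injEq]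
  constructor
  · rintro ⟨t, ⟨ht1, ht2⟩, c, hc, rfl, rfl⟩
    omega
  · rintro ⟨ha, hb, hab⟩
    exact ⟨size.tdiv 2 - 1 - a - b, by omega, a.toNat, by omega, by omega, by omega⟩

theorem pv_mem_listB (size : Int) (p : Int × Int) :
    p ∈ pvListB size ↔ 0 ≤ p.1 ∧ 0 ≤ p.2 ∧ p.1 + p.2 ≤ size.tdiv 2 - 2 := by
  obtain ⟨a, b⟩ := p
  simp only [pvListB, List.mem_flatMap, PySem.List.mem_pyRange_one, List.mem_map, Prod.mk.injEq]
  constructor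
  · rintro ⟨oy, hoy, ox, hox, rfl, rfl⟩; omega
  · rintro ⟨ha, hb, hab⟩
    exact ⟨a, by omega, b, by omega, rfl, rfl⟩

theorem pv_nodup_listA (size : Int) : (pvListA size).Nodup := by
  unfold pvListA
  rw [List.nodup_flatMap]
  refine ⟨fun t _ => ?_, ?_⟩
  · apply List.Pairwise.map _ ?_ List.nodup_range
    intro a b hab
    simp only [ne_eq, Prod.mk.injEq, not_and]
    intro h1 _
    exact hab (by exact_mod_cast h1)
  · apply (PySem.List.pairwise_lt_pyRange_one 1 (size.tdiv 2)).imp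
    intro t t' hlt p hp hp'
    simp only [List.mem_map, List.mem_range] at hp hp'
    obtain ⟨c, hc, rfl⟩ := hp
    obtain ⟨c', hc', he⟩ := hp'
    have h1 := congrArg Prod.fst he
    have h2 := congrArg Prod.snd he
    simp only at h1 h2
    omega

theorem pv_nodup_listB (size : Int) : (pvListB size).Nodup := by
  unfold pvListB
  rw [List.nodup_flatMap]
  refine ⟨fun oy _ => ?_, ?_⟩
  · apply List.Pairwise.map _ ?_ (PySem.List.nodup_pyRange_one 0 (size.tdiv 2 - 1 - oy))
    intro a b hab
    simp only [ne_eq, Prod.mk.injEq, not_and]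
    intro _ h2
    exact hab h2
  · apply (PySem.List.pairwise_lt_pyRange_one 0 (size.tdiv 2 - 1)).imp
    intro oy oy' hlt p hp hp'
    simp only [List.mem_map] at hp hp'
    obtain ⟨ox, _, rfl⟩ := hp
    obtain ⟨ox', _, he⟩ := hp'
    have h1 := congrArg Prod.fst he
    simp only at h1
    omega

theorem pv_perm (size : Int) : (pvListA size).Perm (pvListB size) := by
  rw [List.perm_ext_iff_of_nodup (pv_nodup_listA size) (pv_nodup_listB size)]
  intro p
  rw [pv_mem_listA, pv_mem_listB]

-- ===== VERDICT (by name: the statement is the Claim_ definition above) =====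
theorem draw_o_marker_spec : Claim_equal_draw_o_marker := by
  intro v h_ size matrix _ _
  unfold Spec_draw_o_marker
  rw [pvA_eq, pvB_eq]
  exact @List.Perm.foldl_eq _ _ _ _ _
    ⟨fun m p p' => pvSetCell_comm m (v - p.1) (h_ - p.2) (v - p'.1) (h_ - p'.2)⟩
    (pv_perm size) matrix
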